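-- pv_equiv track=rewrite | github.com/rupesh43210/cvss_calculator | cvss_calculator.py | create_v31_vector_string
-- ===== SOURCE A (Python) =====
-- from typing import Dict, Optional, Any
--
-- def create_v31_vector_string(metrics: Dict[str, str]) -> str:
--     """Create CVSS v3.1 vector string from metrics"""
--     # Define metric groups
--     base_metrics = ['AV', 'AC', 'PR', 'UI', 'S', 'C', 'I', 'A']
--     temporal_metrics = ['E', 'RL', 'RC']
--     environmental_metrics = ['CR', 'IR', 'AR', 'MAV', 'MAC', 'MPR', 'MUI', 'MS', 'MC', 'MI', 'MA']
--
--     vector_parts = ['CVSS:3.1']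
--
--     # Add base metrics
--     for metric in base_metrics:
--         if metric in metrics:
--             vector_parts.append(f"{metric}:{metrics[metric]}")
--
--     # Add temporal metrics
--     for metric in temporal_metrics:
--         if metric in metrics:
--             vector_parts.append(f"{metric}:{metrics[metric]}")
--
--     # Add environmental metrics
--     for metric in environmental_metrics:
--         if metric in metrics:
--             vector_parts.append(f"{metric}:{metrics[metric]}")
--
--     return '/'.join(vector_parts)
-- ===== SOURCE B (Python) =====
-- _ORDER = {m: i for i, m in enumerate([
--     'AV', 'AC', 'PR', 'UI', 'S', 'C', 'I', 'A',
--     'E', 'RL', 'RC',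
--     'CR', 'IR', 'AR', 'MAV', 'MAC', 'MPR', 'MUI', 'MS', 'MC', 'MI', 'MA'])}
--
--
-- def create_v31_vector_string(metrics):
--     """Create CVSS v3.1 vector string from metrics"""
--     tagged = [(i, f"{k}:{v}") for k, v in metrics.items()
--               if (i := _ORDER.get(k)) is not None]
--     tagged.sort(key=lambda t: t[0])
--     return '/'.join(['CVSS:3.1'] + [part for _, part in tagged])
-- ===== Notes on version B (the rewrite author's own statement) =====
-- stated objective: idiomatic
-- what changed: Instead of scanning three fixed metric lists with membership tests against the dict, B scans the input items once, tags each known key with its position in a precomputed order table, sorts by that position and joins; Pre_ only excludes association lists with duplicate keys, which represent no Python dict.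
import Mathlib
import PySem

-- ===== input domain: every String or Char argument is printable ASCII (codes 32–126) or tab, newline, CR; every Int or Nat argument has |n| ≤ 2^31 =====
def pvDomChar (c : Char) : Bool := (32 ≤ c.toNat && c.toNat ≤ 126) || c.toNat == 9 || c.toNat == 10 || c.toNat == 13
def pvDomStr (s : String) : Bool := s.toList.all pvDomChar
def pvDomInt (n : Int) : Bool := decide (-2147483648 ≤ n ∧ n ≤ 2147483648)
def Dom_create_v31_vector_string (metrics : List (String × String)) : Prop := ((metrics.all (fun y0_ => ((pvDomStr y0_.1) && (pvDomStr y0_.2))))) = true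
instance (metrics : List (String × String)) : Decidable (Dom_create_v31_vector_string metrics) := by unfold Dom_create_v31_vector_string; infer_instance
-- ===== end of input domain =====

-- B replaces A's three canonical-list scans with one pass over the items, tagging each known key
-- with its position from a precomputed order table, sorting by it and joining (return value only).

-- ===== PORT A =====
def create_v31_vector_string (metrics : List (String × String)) : String :=
  let d := PySem.Dict.mk metrics
  let base_metrics : List String := ["AV", "AC", "PR", "UI", "S", "C", "I", "A"]
  let temporal_metrics : List String := ["E", "RL", "RC"]
  let environmental_metrics : List String := ["CR", "IR", "AR", "MAV", "MAC", "MPR", "MUI", "MS", "MC", "MI", "MA"]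
  let vector_parts : List String := ["CVSS:3.1"]
  let vector_parts := base_metrics.foldl
    (fun acc metric => if d.contains metric then acc ++ [metric ++ ":" ++ d.getD metric ""] else acc) vector_parts
  let vector_parts := temporal_metrics.foldl
    (fun acc metric => if d.contains metric then acc ++ [metric ++ ":" ++ d.getD metric ""] else acc) vector_parts
  let vector_parts := environmental_metrics.foldl
    (fun acc metric => if d.contains metric then acc ++ [metric ++ ":" ++ d.getD metric ""] else acc) vector_parts
  PySem.Str.join "/" vector_parts

-- ===== PORT B =====
def pvCanon : List String :=
  ["AV", "AC", "PR", "UI", "S", "C", "I", "A",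
   "E", "RL", "RC",
   "CR", "IR", "AR", "MAV", "MAC", "MPR", "MUI", "MS", "MC", "MI", "MA"]

-- _ORDER = {m: i for i, m in enumerate([...])}
def pvOrder : PySem.Dict String Int :=
  (PySem.List.enumerate pvCanon 0).foldl (fun d p => d.insert p.2 p.1) PySem.Dict.empty

def create_v31_vector_string_alt (metrics : List (String × String)) : String :=
  let tagged := metrics.filterMap
    (fun p => (pvOrder.get? p.1).map (fun i => (i, p.1 ++ ":" ++ p.2)))
  let tagged := PySem.List.sorted tagged (fun t => t.1) false
  PySem.Str.join "/" ("CVSS:3.1" :: tagged.map (fun t => t.2))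

-- ===== PRECONDITION & SPEC =====
-- Pre_ excludes association lists with duplicate keys, where the assoc-list representation of the
-- dict parameter is ambiguous (a Python dict never contains duplicates).
def Pre_create_v31_vector_string (metrics : List (String × String)) : Prop :=
  (metrics.map Prod.fst).Nodup
instance (metrics : List (String × String)) : Decidable (Pre_create_v31_vector_string metrics) := by
  unfold Pre_create_v31_vector_string; infer_instance

def pvWitness_create_v31_vector_string : (List (String × String)) :=
  [("AV", "N"), ("AC", "L"), ("E", "U"), ("XX", "9")]

def Spec_create_v31_vector_string (metrics : List (String × String)) (out : String) : Prop :=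
  out = create_v31_vector_string_alt metrics
instance (metrics : List (String × String)) (out : String) : Decidable (Spec_create_v31_vector_string metrics out) := by
  unfold Spec_create_v31_vector_string; infer_instance

-- ===== CLAIM (what is proved, stated in full; the proofs are below) =====
def Claim_equal_create_v31_vector_string : Prop :=
  ∀ (metrics : List (String × String)), Dom_create_v31_vector_string metrics →
    Pre_create_v31_vector_string metrics →
    Spec_create_v31_vector_string metrics (create_v31_vector_string metrics)

-- ===== LEMMAS AND PROOFS =====

-- the canonical target list both sides reduce to
def pvT (d : PySem.Dict String String) : List (Int × String) :=
  (PySem.List.enumerate pvCanon 0).filterMap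
    (fun q => (d.get? q.2).map (fun v => (q.1, q.2 ++ ":" ++ v)))

lemma pvOrder_items :
    pvOrder.items = (PySem.List.enumerate pvCanon 0).map (fun p => (p.2, p.1)) := by
  unfold pvOrder
  have h := PySem.Dict.items_foldl_insert_fresh (PySem.List.enumerate pvCanon 0)
      (fun p => p.2) (fun p => p.1) PySem.Dict.empty
      (fun a _ => PySem.Dict.contains_empty a.2)
      (by rw [PySem.List.map_snd_enumerate]; decide)
  simpa using h

lemma pvOrder_keys_nodup : pvOrder.keys.Nodup := by decide

lemma pvOrder_get?_iff (k : String) (i : Int) :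
    pvOrder.get? k = some i ↔ (i, k) ∈ PySem.List.enumerate pvCanon 0 := by
  rw [PySem.Dict.get?_eq_some_iff_mem_items pvOrder k i pvOrder_keys_nodup, pvOrder_items]
  constructor
  · intro h
    obtain ⟨p, hp, he⟩ := List.mem_map.1 h
    obtain ⟨a, b⟩ := p
    simp only [Prod.mk.injEq] at he
    obtain ⟨h1, h2⟩ := he
    subst h1; subst h2
    exact hp
  · intro h
    exact List.mem_map.2 ⟨(i, k), h, rfl⟩

lemma pvT_map_snd_aux (d : PySem.Dict String String) (l : List String) (s : Int) :
    ((PySem.List.enumerate l s).filterMap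
        (fun q => (d.get? q.2).map (fun v => (q.1, q.2 ++ ":" ++ v)))).map (fun t => t.2)
      = (l.filter (fun m => d.contains m)).map (fun m => m ++ ":" ++ d.getD m "") := by
  induction l generalizing s with
  | nil => simp [PySem.List.enumerate_nil]
  | cons m t ih =>
    rw [PySem.List.enumerate_cons]
    cases hv : d.get? m with
    | none =>
        simp [hv, PySem.Dict.contains_eq_isSome_get?, ih]
    | some v =>
        simp [hv, PySem.Dict.contains_eq_isSome_get?, PySem.Dict.getD_eq_get?_getD, ih]

lemma pvT_map_snd (d : PySem.Dict String String) :
    (pvT d).map (fun t => t.2)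
      = (pvCanon.filter (fun m => d.contains m)).map (fun m => m ++ ":" ++ d.getD m "") :=
  pvT_map_snd_aux d pvCanon 0

lemma pvT_pairwise (d : PySem.Dict String String) :
    (pvT d).Pairwise (fun a b => a.1 < b.1) := by
  unfold pvT
  rw [List.pairwise_filterMap]
  refine (PySem.List.pairwise_lt_enumerate pvCanon 0).imp ?_
  intro a a' h b hb b' hb'
  obtain ⟨v, _, rfl⟩ := Option.map_eq_some_iff.1 hb
  obtain ⟨v', _, rfl⟩ := Option.map_eq_some_iff.1 hb'
  exact h

lemma pv_enum_fst_nodup : ((PySem.List.enumerate pvCanon 0).map Prod.fst).Nodup := by decide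

lemma pv_perm (metrics : List (String × String)) (hnd : (metrics.map Prod.fst).Nodup) :
    (pvT (PySem.Dict.mk metrics)).Perm
      (metrics.filterMap (fun p => (pvOrder.get? p.1).map (fun i => (i, p.1 ++ ":" ++ p.2)))) := by
  have hkmk : (PySem.Dict.mk metrics).keys.Nodup := by
    rw [PySem.Dict.keys_mk]; exact hnd
  have hmem : ∀ k v, (PySem.Dict.mk metrics).get? k = some v ↔ (k, v) ∈ metrics := fun k v =>
    PySem.Dict.get?_eq_some_iff_mem_items _ k v hkmk
  have hT : (pvT (PySem.Dict.mk metrics)).Nodup := by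
    refine (pvT_pairwise _).imp ?_
    intro a b hlt he
    rw [he] at hlt
    exact lt_irrefl _ hlt
  have hTag : (metrics.filterMap
      (fun p => (pvOrder.get? p.1).map (fun i => (i, p.1 ++ ":" ++ p.2)))).Nodup := by
    refine List.Nodup.filterMap ?_ (List.Nodup.of_map Prod.fst hnd)
    intro p p' b hb hb'
    rw [Option.mem_def, Option.map_eq_some_iff] at hb hb'
    obtain ⟨i, hi, rfl⟩ := hb
    obtain ⟨i', hi', he⟩ := hb'
    have h1 : i' = i := congrArg Prod.fst he
    have h2 : p'.1 ++ ":" ++ p'.2 = p.1 ++ ":" ++ p.2 := congrArg Prod.snd he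
    subst h1
    have hk : p'.1 = p.1 := by
      have hm := (pvOrder_get?_iff _ _).1 hi
      have hm' := (pvOrder_get?_iff _ _).1 hi'
      have := List.inj_on_of_nodup_map pv_enum_fst_nodup hm' hm rfl
      exact congrArg Prod.snd this
    have hv : p'.2 = p.2 := by
      rw [hk] at h2
      have := congrArg String.toList h2
      simp only [String.toList_append] at this
      exact String.toList_inj.1 (List.append_cancel_left this)
    exact (Prod.ext hk hv).symm
  rw [List.perm_ext_iff_of_nodup hT hTag]
  intro x
  constructor
  · intro hx
    obtain ⟨q, hq, hfx⟩ := List.mem_filterMap.1 hx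
    obtain ⟨v, hv, rfl⟩ := Option.map_eq_some_iff.1 hfx
    refine List.mem_filterMap.2 ⟨(q.2, v), (hmem _ _).1 hv, ?_⟩
    rw [(pvOrder_get?_iff q.2 q.1).2 (by simpa using hq)]
    rfl
  · intro hx
    obtain ⟨p, hp, hfx⟩ := List.mem_filterMap.1 hx
    obtain ⟨i, hi, rfl⟩ := Option.map_eq_some_iff.1 hfx
    refine List.mem_filterMap.2 ⟨(i, p.1), (pvOrder_get?_iff p.1 i).1 hi, ?_⟩
    rw [(hmem _ _).2 hp]
    rfl

-- ===== VERDICT (by name: the statement is the Claim_ definition above) =====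
theorem create_v31_vector_string_spec : Claim_equal_create_v31_vector_string := by
  intro metrics _ hpre
  unfold Spec_create_v31_vector_string create_v31_vector_string create_v31_vector_string_alt
  simp only [PySem.List.foldl_append_if]
  rw [PySem.List.sorted_eq_of_perm_of_pairwise_lt _ _ _ (pv_perm metrics hpre) (pvT_pairwise _)]
  rw [pvT_map_snd]
  have hsplit : pvCanon
      = ["AV", "AC", "PR", "UI", "S", "C", "I", "A"] ++ ["E", "RL", "RC"]
        ++ ["CR", "IR", "AR", "MAV", "MAC", "MPR", "MUI", "MS", "MC", "MI", "MA"] := rfl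
  rw [hsplit, List.filter_append, List.filter_append, List.map_append, List.map_append]
  simp only [List.append_assoc, List.cons_append, List.nil_append]
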